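-- pv_equiv track=rewrite | github.com/Lienar/Homework | module2hard.py | result
-- ===== SOURCE A (Python) =====
-- def result(n):
--     password = ''
--     for i in range (1, 21):
--         for j in range (i, 21):
--             if i != n and j != n:
--                 if n % (i+j) == 0:
--                     if i != j:
--                         password = password + str(i) + str(j)
--     return password
-- ===== SOURCE B (Python) =====
-- def result(n):
--     S = [d for d in range(3, 41) if n % d == 0]
--     password = ''
--     for i in range(1, 21):
--         if i == n:
--             continue
--         for d in S:
--             j = d - i
--             if i < j <= 20 and j != n:
--                 password += str(i) + str(j)
--     return password
-- ===== Notes on version B (the rewrite author's own statement) =====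
-- stated objective: alternative
-- what changed: B precomputes the list of sums d in 3..40 that divide n once, then for each i walks only those divisor sums (j = d - i, with i < j <= 20 and j != n) instead of rescanning all j in i..20 and running a modulo test per pair.
import Mathlib
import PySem

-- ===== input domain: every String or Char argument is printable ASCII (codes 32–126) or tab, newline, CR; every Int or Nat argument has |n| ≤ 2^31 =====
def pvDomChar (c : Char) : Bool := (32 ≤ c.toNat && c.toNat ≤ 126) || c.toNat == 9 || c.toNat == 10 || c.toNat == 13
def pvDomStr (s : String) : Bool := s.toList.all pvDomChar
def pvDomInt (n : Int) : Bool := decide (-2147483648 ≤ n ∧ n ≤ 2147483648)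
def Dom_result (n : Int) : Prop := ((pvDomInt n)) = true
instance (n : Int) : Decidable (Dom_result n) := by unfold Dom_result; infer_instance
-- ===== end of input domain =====

-- B computes the list of sums d in 3..40 dividing n once up front and, per i, walks
-- only those sums (j = d - i) instead of re-testing n % (i+j) for every pair (i, j);
-- same output string by a different traversal of the pairs (objective: alternative).

-- ===== PORT A =====
def result (n : Int) : String :=
  String.ofList ((PySem.List.pyRange 1 21 1).foldl (fun pw i =>
    (PySem.List.pyRange i 21 1).foldl (fun pw j =>
      if i ≠ n ∧ j ≠ n then
        if PySem.Int.mod n (i + j) = 0 then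
          if i ≠ j then pw ++ PySem.Int.toChars i ++ PySem.Int.toChars j else pw
        else pw
      else pw) pw) [])

-- ===== PORT B =====
def result_alt (n : Int) : String :=
  let S := (PySem.List.pyRange 3 41 1).filter (fun d => decide (PySem.Int.mod n d = 0))
  String.ofList ((PySem.List.pyRange 1 21 1).foldl (fun pw i =>
    if i = n then pw
    else S.foldl (fun pw d =>
      let j := d - i
      if i < j ∧ j ≤ 20 ∧ j ≠ n then pw ++ PySem.Int.toChars i ++ PySem.Int.toChars j
      else pw) pw) [])

-- ===== PRECONDITION & SPEC =====
def Spec_result (n : Int) (out : String) : Prop := out = result_alt n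
instance (n : Int) (out : String) : Decidable (Spec_result n out) := by unfold Spec_result; infer_instance

-- ===== CLAIM (what is proved, stated in full; the proofs are below) =====
def Claim_equal_result : Prop := ∀ (n : Int), Dom_result n → Spec_result n (result n)

-- ===== LEMMAS AND PROOFS =====

-- The per-i lists of appended characters agree: A's scan of j in (i, 20] with the
-- divisibility test equals B's scan of the precomputed divisor sums d with j = d - i.
theorem result_lists_eq (n i : Int) (h1 : 1 ≤ i) (h2 : i ≤ 20) (hin : i ≠ n) :
    ((PySem.List.pyRange i 21 1).filter
        (fun j => decide (i ≠ n ∧ j ≠ n ∧ PySem.Int.mod n (i + j) = 0 ∧ i ≠ j))).flatMap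
      (fun j => PySem.Int.toChars i ++ PySem.Int.toChars j)
    = (((PySem.List.pyRange 3 41 1).filter (fun d => decide (PySem.Int.mod n d = 0))).filter
        (fun d => decide (i < d - i ∧ d - i ≤ 20 ∧ d - i ≠ n))).flatMap
      (fun d => PySem.Int.toChars i ++ PySem.Int.toChars (d - i)) := by
  rw [List.filter_filter]
  set q : Int → Bool := fun d => decide (i < d - i ∧ d - i ≤ 20 ∧ d - i ≠ n) && decide (PySem.Int.mod n d = 0) with hq
  have hnil1 : (PySem.List.pyRange 3 (2*i+1) 1).filter q = [] := by
    apply List.filter_eq_nil_iff.mpr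
    intro d hd
    rw [PySem.List.mem_pyRange_one] at hd
    simp only [hq, Bool.and_eq_true, decide_eq_true_eq, not_and]
    intro h; omega
  have hnil2 : (PySem.List.pyRange (i+21) 41 1).filter q = [] := by
    apply List.filter_eq_nil_iff.mpr
    intro d hd
    rw [PySem.List.mem_pyRange_one] at hd
    simp only [hq, Bool.and_eq_true, decide_eq_true_eq, not_and]
    intro h; omega
  rw [PySem.List.pyRange_one_append 3 (2*i+1) 41 (by omega) (by omega),
      PySem.List.pyRange_one_append (2*i+1) (i+21) 41 (by omega) (by omega),
      List.filter_append, List.filter_append, hnil1, hnil2,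
      List.flatMap_append, List.flatMap_append]
  simp only [List.flatMap_nil, List.append_nil, List.nil_append]
  have hshift : PySem.List.pyRange (2*i+1) (i+21) 1 = (PySem.List.pyRange (i+1) 21 1).map (· + i) := by
    rw [PySem.List.pyRange_one, PySem.List.pyRange_one, List.map_map]
    have h3 : (i + 21 - (2*i+1)).toNat = (21 - (i+1)).toNat := by omega
    rw [h3]
    apply List.map_congr_left
    intro k _
    simp only [Function.comp_apply]
    ring
  rw [hshift, List.filter_map, List.flatMap_map]
  rw [PySem.List.pyRange_one_cons (by omega : i < 21)]
  rw [List.filter_cons_of_neg (by simp)]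
  simp only [hq, Function.comp_def, add_sub_cancel_right]
  rw [List.filter_congr (q := fun j => decide (i < j ∧ j ≤ 20 ∧ j ≠ n) && decide (PySem.Int.mod n (j + i) = 0)) (by
    intro j hj
    rw [PySem.List.mem_pyRange_one] at hj
    rw [Bool.eq_iff_iff]
    simp only [Bool.and_eq_true, decide_eq_true_eq]
    rw [show j + i = i + j by ring]
    constructor
    · rintro ⟨-, hjn, hm, -⟩; exact ⟨⟨by omega, by omega, hjn⟩, hm⟩
    · rintro ⟨⟨-, -, hjn⟩, hm⟩; exact ⟨hin, hjn, hm, by omega⟩)]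

-- A's value equals B's value for every n.
theorem result_main_eq (n : Int) : result n = result_alt n := by
  unfold result result_alt
  simp only []
  congr 1
  apply PySem.List.foldl_congr_mem
  intro pw i hi
  rw [PySem.List.mem_pyRange_one] at hi
  by_cases hin : i = n
  · rw [if_pos hin]
    trans (List.foldl (fun (pw : List Char) (_ : Int) => pw) pw (PySem.List.pyRange i 21 1))
    · apply PySem.List.foldl_congr_mem
      intro acc j _
      simp [hin]
    · exact PySem.List.foldl_ignore _ _
  · rw [if_neg hin]
    trans (List.foldl
        (fun (pw : List Char) (j : Int) =>
          if i ≠ n ∧ j ≠ n ∧ PySem.Int.mod n (i + j) = 0 ∧ i ≠ j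
          then pw ++ (PySem.Int.toChars i ++ PySem.Int.toChars j) else pw)
        pw (PySem.List.pyRange i 21 1))
    · apply PySem.List.foldl_congr_mem
      intro acc j _
      split_ifs <;> simp_all [List.append_assoc]
    trans (List.foldl
        (fun (pw : List Char) (d : Int) =>
          if i < d - i ∧ d - i ≤ 20 ∧ d - i ≠ n
          then pw ++ (PySem.Int.toChars i ++ PySem.Int.toChars (d - i)) else pw)
        pw ((PySem.List.pyRange 3 41 1).filter (fun d => decide (PySem.Int.mod n d = 0))))
    · rw [PySem.List.foldl_ite_eq_foldl_filter, PySem.List.foldl_ite_eq_foldl_filter,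
          PySem.List.foldl_append_eq_flatMap, PySem.List.foldl_append_eq_flatMap,
          result_lists_eq n i (by omega) (by omega) hin]
    · apply PySem.List.foldl_congr_mem
      intro acc d _
      split_ifs <;> simp_all [List.append_assoc]

-- ===== VERDICT (by name: the statement is the Claim_ definition above) =====
theorem result_spec : Claim_equal_result := by
  intro n _
  unfold Spec_result
  exact result_main_eq n
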